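-- pv_equiv track=rewrite | github.com/compbiogroup/Approximation-Algorithms-for-Sorting-by-k-Cuts-on-Signed-Permutations | CG.py | partial_extension
-- ===== SOURCE A (Python) =====
-- def partial_extension(in_set, extensions) :
--     ## Ja verifiquei os intervalos que estao dentro e for do
--     ## ciclo hamiltoniano que eu quero tratar. Agora eu
--     ## extendo com qualquer ciclo que tem aresta preta dentro
--     ## e fora do intervalo.
--
--     cycle_to_extend = None
--     count = 0
--     while count < len(extensions) :
--
--         cycle = extensions[count]
--         in_cycle  = False
--         out_cycle = False
--         for el in cycle :
--             aux_in  = False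
--             for in_range in in_set :
--                 if in_range[0] < 2*abs(el)-1 < in_range[1] :
--                     aux_in = True
--             if aux_in :
--                 in_cycle  = True
--             else :
--                 out_cycle = True
--
--         if in_cycle and out_cycle :
--             cycle_to_extend = cycle
--             break
--         count = count + 1
--     return cycle_to_extend, count
-- ===== SOURCE B (Python) =====
-- def partial_extension(in_set, extensions):
--     # Merge the (open) intervals once, sorted by start; membership of a point
--     # is then a binary search over the disjoint merged intervals.
--     merged = []
--     cur = None
--     for rng in sorted(in_set, key=lambda r: r[0]):
--         a, b = rng[0], rng[1]
--         if cur is None: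
--             cur = (a, b)
--         elif a < cur[1]:
--             if b > cur[1]:
--                 cur = (cur[0], b)
--         else:
--             merged.append(cur)
--             cur = (a, b)
--     if cur is not None:
--         merged.append(cur)
--
--     def contains(p):
--         # rightmost interval with start < p, by binary search
--         lo, hi = 0, len(merged)
--         while lo < hi:
--             mid = (lo + hi) // 2
--             if merged[mid][0] < p:
--                 lo = mid + 1
--             else:
--                 hi = mid
--         return lo > 0 and p < merged[lo - 1][1]
--
--     for count, cycle in enumerate(extensions):
--         in_cycle = out_cycle = False
--         for el in cycle:
--             if contains(2 * abs(el) - 1):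
--                 in_cycle = True
--             else:
--                 out_cycle = True
--             if in_cycle and out_cycle:
--                 return cycle, count
--     return None, len(extensions)
-- ===== Notes on version B (the rewrite author's own statement) =====
-- stated objective: faster
-- what changed: Instead of rescanning every interval of in_set for every element of every cycle, B sorts and merges the intervals once into a disjoint list, answers each membership query by binary search on it, and early-exits a cycle as soon as both the inside and outside flags are set.
import Mathlib
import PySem

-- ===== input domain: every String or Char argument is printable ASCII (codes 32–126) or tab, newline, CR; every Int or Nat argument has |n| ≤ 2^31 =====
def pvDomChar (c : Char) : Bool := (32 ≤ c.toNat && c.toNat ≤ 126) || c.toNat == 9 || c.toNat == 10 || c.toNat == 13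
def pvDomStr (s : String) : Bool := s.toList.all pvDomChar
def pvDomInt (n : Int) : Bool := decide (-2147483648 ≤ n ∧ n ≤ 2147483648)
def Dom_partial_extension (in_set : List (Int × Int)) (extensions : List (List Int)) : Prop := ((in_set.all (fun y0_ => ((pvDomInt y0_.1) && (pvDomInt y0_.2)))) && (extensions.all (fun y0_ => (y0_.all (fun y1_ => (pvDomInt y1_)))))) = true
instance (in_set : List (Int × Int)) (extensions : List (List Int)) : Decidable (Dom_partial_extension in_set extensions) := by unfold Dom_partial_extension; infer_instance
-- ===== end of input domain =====

-- B merges the sorted intervals once and answers each membership query by binary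
-- search on the disjoint merged list, exiting as soon as both flags are set;
-- A rescans every interval for every element of every cycle.

-- ===== PORT A =====
-- inner 'for in_range in in_set' loop computing aux_in
def paAux (in_set : List (Int × Int)) (el : Int) : Bool :=
  in_set.foldl
    (fun aux_in in_range =>
      if in_range.1 < 2 * |el| - 1 ∧ 2 * |el| - 1 < in_range.2 then true else aux_in)
    false

-- 'for el in cycle' loop computing (in_cycle, out_cycle)
def paFlags (in_set : List (Int × Int)) (cycle : List Int) : Bool × Bool :=
  cycle.foldl
    (fun fl el => if paAux in_set el then (true, fl.2) else (fl.1, true))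
    (false, false)

-- the 'while count < len(extensions)' loop; the structural fuel only bounds the
-- number of iterations (it is extensions.length - count at every call)
def paLoop (in_set : List (Int × Int)) (extensions : List (List Int)) :
    Nat → Int → Option (List Int) × Int
  | 0, count => (none, count)
  | fuel + 1, count =>
    if count < (extensions.length : Int) then
      match PySem.List.pyGet? extensions count with
      | some cycle =>
        let fl := paFlags in_set cycle
        if fl.1 && fl.2 then (some cycle, count)
        else paLoop in_set extensions fuel (count + 1)
      | none => (none, count)   -- unreachable: count is in range
    else (none, count)

def partial_extension (in_set : List (Int × Int)) (extensions : List (List Int)) :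
    Option (List Int) × Int :=
  paLoop in_set extensions extensions.length 0

-- ===== PORT B =====
-- one step of the interval-merging loop; state = (merged, cur)
def pbMergeStep (st : List (Int × Int) × Option (Int × Int)) (rng : Int × Int) :
    List (Int × Int) × Option (Int × Int) :=
  match st.2 with
  | none => (st.1, some (rng.1, rng.2))
  | some cur =>
    if rng.1 < cur.2 then
      if rng.2 > cur.2 then (st.1, some (cur.1, rng.2)) else (st.1, some cur)
    else (st.1 ++ [cur], some (rng.1, rng.2))

def pbMerged (in_set : List (Int × Int)) : List (Int × Int) :=
  let st := (PySem.List.sorted in_set (fun r => r.1) false).foldl pbMergeStep ([], none)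
  match st.2 with
  | none => st.1
  | some cur => st.1 ++ [cur]

-- while lo < hi binary search; merged[mid] is always in range, getD is exact here;
-- the structural fuel only bounds the iteration count (hi - lo shrinks each turn)
def pbBis (merged : List (Int × Int)) (p : Int) : Nat → Nat → Nat → Nat
  | 0, lo, _ => lo
  | fuel + 1, lo, hi =>
    if lo < hi then
      let mid := (lo + hi) / 2
      if (merged.getD mid (0, 0)).1 < p then pbBis merged p fuel (mid + 1) hi
      else pbBis merged p fuel lo mid
    else lo

def pbContains (merged : List (Int × Int)) (p : Int) : Bool :=
  let lo := pbBis merged p merged.length 0 merged.length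
  decide (0 < lo) && decide (p < (merged.getD (lo - 1) (0, 0)).2)

-- 'for el in cycle' with early return once both flags are set
def pbCycle (merged : List (Int × Int)) : List Int → Bool → Bool → Bool
  | [], _, _ => false
  | el :: t, in_c, out_c =>
    let c := pbContains merged (2 * |el| - 1)
    let in_c' := if c then true else in_c
    let out_c' := if c then out_c else true
    if in_c' && out_c' then true else pbCycle merged t in_c' out_c'

-- 'for count, cycle in enumerate(extensions)' with early return
def pbLoop (merged : List (Int × Int)) : List (List Int) → Int → Option (List Int × Int)
  | [], _ => none
  | cycle :: rest, count =>
    if pbCycle merged cycle false false then some (cycle, count)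
    else pbLoop merged rest (count + 1)

def partial_extension_alt (in_set : List (Int × Int)) (extensions : List (List Int)) :
    Option (List Int) × Int :=
  let merged := pbMerged in_set
  match pbLoop merged extensions 0 with
  | some (cycle, count) => (some cycle, count)
  | none => (none, (extensions.length : Int))

-- ===== PRECONDITION & SPEC =====
def Spec_partial_extension (in_set : List (Int × Int)) (extensions : List (List Int)) (out : Option (List Int) × Int) : Prop := out = partial_extension_alt in_set extensions
instance (in_set : List (Int × Int)) (extensions : List (List Int)) (out : Option (List Int) × Int) : Decidable (Spec_partial_extension in_set extensions out) := by unfold Spec_partial_extension; infer_instance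

-- ===== CLAIM (what is proved, stated in full; the proofs are below) =====
def Claim_equal_partial_extension : Prop := ∀ (in_set : List (Int × Int)) (extensions : List (List Int)), Dom_partial_extension in_set extensions → Spec_partial_extension in_set extensions (partial_extension in_set extensions)

-- ===== LEMMAS AND PROOFS =====

-- a point p lies in some open interval of M
def covers (M : List (Int × Int)) (p : Int) : Prop := ∃ r ∈ M, r.1 < p ∧ p < r.2

theorem covers_nil (p : Int) : covers [] p ↔ False := by simp [covers]

theorem covers_append (M N : List (Int × Int)) (p : Int) :
    covers (M ++ N) p ↔ covers M p ∨ covers N p := by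
  simp [covers, or_and_right, exists_or]

theorem covers_singleton (r : Int × Int) (p : Int) :
    covers [r] p ↔ (r.1 < p ∧ p < r.2) := by
  simp [covers]

theorem covers_cons' (r : Int × Int) (M : List (Int × Int)) (p : Int) :
    covers (r :: M) p ↔ covers [r] p ∨ covers M p := by
  simp [covers]

-- A's inner loop, with a generalized accumulator
theorem paAux_foldl (p : Int) (l : List (Int × Int)) (init : Bool) :
    l.foldl (fun aux_in r => if r.1 < p ∧ p < r.2 then true else aux_in) init
      = (init || l.any fun r => decide (r.1 < p ∧ p < r.2)) := by
  induction l generalizing init with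
  | nil => simp
  | cons r t ih =>
    rw [List.foldl_cons, ih]
    by_cases h : r.1 < p ∧ p < r.2
    · simp [h]
    · rw [if_neg h]
      have hf : (decide (r.1 < p) && decide (p < r.2)) = false := by
        rcases not_and_or.mp h with h | h <;> simp [h]
      simp [hf]

-- A's inner loop is the existence test
theorem paAux_iff (in_set : List (Int × Int)) (el : Int) :
    paAux in_set el = true ↔ covers in_set (2 * |el| - 1) := by
  unfold paAux
  rw [paAux_foldl]
  simp [covers, List.any_eq_true]

-- merged-list well-formedness: every earlier interval starts and ends before a later one starts
def goodM (M : List (Int × Int)) : Prop :=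
  M.Pairwise (fun x y => x.1 ≤ y.1 ∧ x.2 ≤ y.1)

theorem goodM_append_single (M : List (Int × Int)) (y : Int × Int) :
    goodM (M ++ [y]) ↔ goodM M ∧ ∀ x ∈ M, x.1 ≤ y.1 ∧ x.2 ≤ y.1 := by
  simp [goodM, List.pairwise_append]

-- invariant of the merging fold
set_option maxHeartbeats 1000000 in
theorem mergeFold_inv (rem : List (Int × Int)) :
    ∀ (m : List (Int × Int)) (c : Option (Int × Int)),
    rem.Pairwise (fun x y => x.1 ≤ y.1) →
    (∀ cur, c = some cur → (∀ x ∈ m, x.1 ≤ cur.1) ∧ (∀ r ∈ rem, cur.1 ≤ r.1)) →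
    (c = none → m = []) →
    goodM (m ++ c.toList) →
    goodM ((rem.foldl pbMergeStep (m, c)).1 ++ (rem.foldl pbMergeStep (m, c)).2.toList) ∧
    ∀ p, covers ((rem.foldl pbMergeStep (m, c)).1 ++ (rem.foldl pbMergeStep (m, c)).2.toList) p
          ↔ covers (m ++ c.toList) p ∨ covers rem p := by
  induction rem with
  | nil =>
    intro m c _ _ _ hg
    refine ⟨hg, fun p => ?_⟩
    simp [covers_nil]
  | cons r rest ih =>
    intro m c hrem h2 hnone hg
    have hrem' : rest.Pairwise (fun x y => x.1 ≤ y.1) := (List.pairwise_cons.mp hrem).2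
    have hrhead : ∀ r' ∈ rest, r.1 ≤ r'.1 := (List.pairwise_cons.mp hrem).1
    rw [List.foldl_cons]
    match hc : c with
    | none =>
      have hm : m = [] := hnone rfl
      subst hm
      have hstep : pbMergeStep (([] : List (Int × Int)), none) r = ([], some (r.1, r.2)) := rfl
      rw [hstep]
      have h2' : ∀ cur, (some (r.1, r.2) : Option (Int × Int)) = some cur →
          (∀ x ∈ ([] : List (Int × Int)), x.1 ≤ cur.1) ∧ (∀ r' ∈ rest, cur.1 ≤ r'.1) := by
        rintro cur h
        injection h with h; subst h
        exact ⟨by simp, hrhead⟩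
      have hg' : goodM (([] : List (Int × Int)) ++ [(r.1, r.2)]) := by
        simp [goodM]
      obtain ⟨g1, g2⟩ := ih [] (some (r.1, r.2)) hrem' h2' (by simp) hg'
      refine ⟨g1, fun p => ?_⟩
      rw [g2 p]
      simp only [Option.toList_some, Option.toList_none]
      rw [show ((r.1 : Int), (r.2 : Int)) = r from rfl, List.nil_append, List.nil_append,
        covers_cons' r rest, covers_nil, false_or]
    | some cur =>
      obtain ⟨hm, hr⟩ := h2 cur rfl
      have hcr : cur.1 ≤ r.1 := hr r (by simp)
      have hgm : goodM m ∧ ∀ x ∈ m, x.1 ≤ cur.1 ∧ x.2 ≤ cur.1 := by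
        have := (goodM_append_single m cur).mp (by simpa using hg)
        exact this
      by_cases h1 : r.1 < cur.2
      · by_cases hb : r.2 > cur.2
        · have hstep : pbMergeStep (m, some cur) r = (m, some (cur.1, r.2)) := by
            simp [pbMergeStep, h1, hb]
          rw [hstep]
          have h2' : ∀ cur', (some (cur.1, r.2) : Option (Int × Int)) = some cur' →
              (∀ x ∈ m, x.1 ≤ cur'.1) ∧ (∀ r' ∈ rest, cur'.1 ≤ r'.1) := by
            rintro cur' h
            injection h with h; subst h
            exact ⟨hm, fun r' hr' => le_trans hcr (hrhead r' hr')⟩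
          have hg' : goodM (m ++ [(cur.1, r.2)]) := by
            rw [goodM_append_single]
            exact ⟨hgm.1, fun x hx => hgm.2 x hx⟩
          obtain ⟨g1, g2⟩ := ih m (some (cur.1, r.2)) hrem' h2' (by simp) (by simpa using hg')
          refine ⟨g1, fun p => ?_⟩
          rw [g2 p]
          have key : covers [(cur.1, r.2)] p ↔ covers [cur] p ∨ covers [r] p := by
            simp only [covers_singleton]
            omega
          simp only [Option.toList_some]
          rw [covers_append, covers_append, key, covers_cons' r rest]
          generalize covers m p = A
          generalize covers [cur] p = B
          generalize covers [r] p = C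
          generalize covers rest p = D
          tauto
        · have hstep : pbMergeStep (m, some cur) r = (m, some cur) := by
            simp [pbMergeStep, h1, hb]
          rw [hstep]
          have h2' : ∀ cur', (some cur : Option (Int × Int)) = some cur' →
              (∀ x ∈ m, x.1 ≤ cur'.1) ∧ (∀ r' ∈ rest, cur'.1 ≤ r'.1) := by
            rintro cur' h
            injection h with h; subst h
            exact ⟨hm, fun r' hr' => hr r' (by simp [hr'])⟩
          obtain ⟨g1, g2⟩ := ih m (some cur) hrem' h2' (by simp) hg
          refine ⟨g1, fun p => ?_⟩
          rw [g2 p]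
          have key : covers [r] p → covers (m ++ [cur]) p := by
            intro h
            refine (covers_append m [cur] p).mpr (Or.inr ?_)
            rw [covers_singleton] at h ⊢
            omega
          simp only [Option.toList_some]
          rw [covers_cons' r rest]
          revert key
          generalize covers (m ++ [cur]) p = A
          generalize covers [r] p = C
          generalize covers rest p = D
          intro key
          tauto
      · have hstep : pbMergeStep (m, some cur) r = (m ++ [cur], some (r.1, r.2)) := by
          simp [pbMergeStep, h1]
        rw [hstep]
        have h2' : ∀ cur', (some (r.1, r.2) : Option (Int × Int)) = some cur' →
            (∀ x ∈ m ++ [cur], x.1 ≤ cur'.1) ∧ (∀ r' ∈ rest, cur'.1 ≤ r'.1) := by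
          rintro cur' h
          injection h with h; subst h
          constructor
          · intro x hx
            rcases List.mem_append.mp hx with hx | hx
            · exact le_trans (hm x hx) hcr
            · simp at hx; subst hx; exact hcr
          · exact hrhead
        have hg' : goodM ((m ++ [cur]) ++ [(r.1, r.2)]) := by
          rw [goodM_append_single]
          refine ⟨by simpa using hg, ?_⟩
          intro x hx
          rcases List.mem_append.mp hx with hx | hx
          · have := hgm.2 x hx
            omega
          · simp at hx; subst hx
            omega
        obtain ⟨g1, g2⟩ := ih (m ++ [cur]) (some (r.1, r.2)) hrem' h2' (by simp) (by simpa using hg')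
        refine ⟨g1, fun p => ?_⟩
        rw [g2 p]
        simp only [Option.toList_some]
        rw [show ((r.1 : Int), (r.2 : Int)) = r from rfl, covers_append, covers_cons' r rest]
        generalize covers (m ++ [cur]) p = A
        generalize covers [r] p = C
        generalize covers rest p = D
        tauto

theorem pbMerged_spec (in_set : List (Int × Int)) :
    goodM (pbMerged in_set) ∧ ∀ p, covers (pbMerged in_set) p ↔ covers in_set p := by
  have hsorted : (PySem.List.sorted in_set (fun r => r.1) false).Pairwise
      (fun x y => x.1 ≤ y.1) := PySem.List.sorted_pairwise in_set (fun r => r.1)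
  obtain ⟨g1, g2⟩ := mergeFold_inv (PySem.List.sorted in_set (fun r => r.1) false) [] none
    hsorted (by rintro cur ⟨⟩) (fun _ => rfl) (by simp [goodM])
  have hmain : pbMerged in_set =
      ((PySem.List.sorted in_set (fun r => r.1) false).foldl pbMergeStep ([], none)).1 ++
      ((PySem.List.sorted in_set (fun r => r.1) false).foldl pbMergeStep ([], none)).2.toList := by
    unfold pbMerged
    cases h : ((PySem.List.sorted in_set (fun r => r.1) false).foldl pbMergeStep ([], none)).2 <;>
      simp [h]
  have hmemcov : ∀ p, covers (PySem.List.sorted in_set (fun r => r.1) false) p ↔ covers in_set p := by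
    intro p
    simp [covers, PySem.List.mem_sorted]
  rw [hmain]
  refine ⟨g1, fun p => ?_⟩
  rw [g2 p, hmemcov p]
  simp [covers_nil]

-- starts are monotone along a good list
theorem goodM_start_mono (M : List (Int × Int)) (hg : goodM M) :
    ∀ (i j : Nat) (hi : i < M.length) (hj : j < M.length), i ≤ j → (M[i]).1 ≤ (M[j]).1 := by
  intro i j hi hj hij
  rcases Nat.lt_or_ge i j with h | h
  · exact ((List.pairwise_iff_getElem.mp hg) i j hi hj h).1
  · have : i = j := by omega
    subst this; rfl

-- binary-search specification
theorem pbBis_spec (M : List (Int × Int)) (p : Int) (hg : goodM M) :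
    ∀ (n lo hi : Nat), hi - lo ≤ n → lo ≤ hi → hi ≤ M.length →
    (∀ i (h : i < M.length), i < lo → (M[i]).1 < p) →
    (∀ i (h : i < M.length), hi ≤ i → p ≤ (M[i]).1) →
    lo ≤ pbBis M p n lo hi ∧ pbBis M p n lo hi ≤ hi ∧
    (∀ i (h : i < M.length), i < pbBis M p n lo hi → (M[i]).1 < p) ∧
    (∀ i (h : i < M.length), pbBis M p n lo hi ≤ i → p ≤ (M[i]).1) := by
  intro n
  induction n with
  | zero =>
    intro lo hi hfuel hlh hhiM hlow hhigh
    rw [pbBis]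
    refine ⟨le_refl _, hlh, hlow, fun i h hi2 => hhigh i h (by omega)⟩
  | succ n ihn =>
    intro lo hi hfuel hlh hhiM hlow hhigh
    by_cases hlt : lo < hi
    · rw [pbBis, if_pos hlt]
      have hmidlt : (lo + hi) / 2 < hi := by omega
      have hmidge : lo ≤ (lo + hi) / 2 := by omega
      have hmidM : (lo + hi) / 2 < M.length := by omega
      have hgetD : (M.getD ((lo + hi) / 2) (0, 0)) = M[(lo + hi) / 2] := by
        rw [List.getD_eq_getElem M (0,0) hmidM]
      simp only [hgetD]
      by_cases hcmp : (M[(lo + hi) / 2]).1 < p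
      · rw [if_pos hcmp]
        exact And.imp (fun h => by omega) (fun h => h)
          (ihn ((lo + hi) / 2 + 1) hi (by omega) (by omega) hhiM
            (fun i hiM hilt => lt_of_le_of_lt
              (goodM_start_mono M hg i ((lo + hi) / 2) hiM hmidM (by omega)) hcmp)
            hhigh)
      · rw [if_neg hcmp]
        exact And.imp (fun h => h) (And.imp (fun h => by omega) (fun h => h))
          (ihn lo ((lo + hi) / 2) (by omega) (by omega) (by omega) hlow
            (fun i hiM hile => le_trans (le_of_not_gt hcmp)
              (goodM_start_mono M hg ((lo + hi) / 2) i hmidM hiM hile)))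
    · rw [pbBis, if_neg hlt]
      refine ⟨le_refl _, by omega, hlow, fun i h hi2 => hhigh i h (by omega)⟩

-- covers as an indexed statement
theorem covers_iff_getElem (M : List (Int × Int)) (p : Int) :
    covers M p ↔ ∃ (i : Nat) (h : i < M.length), (M[i]).1 < p ∧ p < (M[i]).2 := by
  constructor
  · rintro ⟨r, hr, h1, h2⟩
    obtain ⟨i, hi, hri⟩ := List.mem_iff_getElem.mp hr
    exact ⟨i, hi, by rw [hri]; exact ⟨h1, h2⟩⟩
  · rintro ⟨i, hi, h1, h2⟩
    exact ⟨M[i], List.getElem_mem hi, h1, h2⟩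

theorem pbContains_iff (M : List (Int × Int)) (p : Int) (hg : goodM M) :
    pbContains M p = true ↔ covers M p := by
  obtain ⟨hle1, hle2, hlow, hhigh⟩ := pbBis_spec M p hg M.length 0 M.length
    (by omega) (by omega) (le_refl _) (by omega) (by intro i h hi; omega)
  show (decide (0 < pbBis M p M.length 0 M.length) &&
      decide (p < (M.getD (pbBis M p M.length 0 M.length - 1) (0, 0)).2)) = true ↔ covers M p
  set r := pbBis M p M.length 0 M.length with hr
  rcases Nat.eq_zero_or_pos r with h0 | h0
  · rw [h0]
    simp only [lt_irrefl, decide_false, Bool.false_and]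
    rw [covers_iff_getElem]
    constructor
    · intro h; exact absurd h (by simp)
    · rintro ⟨i, hi, h1, h2⟩
      have := hhigh i hi (by omega)
      omega
  · have hr1 : r - 1 < M.length := by omega
    have hgetD : (M.getD (r - 1) (0, 0)) = M[r - 1] := List.getD_eq_getElem M (0,0) hr1
    simp only [hgetD]
    have hstart : (M[r - 1]).1 < p := hlow (r - 1) hr1 (by omega)
    rw [covers_iff_getElem]
    constructor
    · intro h
      have hp : p < (M[r - 1]).2 := by
        have := (Bool.and_eq_true _ _).mp h
        exact of_decide_eq_true this.2
      exact ⟨r - 1, hr1, hstart, hp⟩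
    · rintro ⟨i, hi, h1, h2⟩
      have hilt : i < r := by
        by_contra hcon
        have := hhigh i hi (by omega)
        omega
      have hp : p < (M[r - 1]).2 := by
        rcases Nat.lt_or_ge i (r - 1) with hlt | hge
        · have := (List.pairwise_iff_getElem.mp hg) i (r - 1) hi hr1 hlt
          omega
        · have : i = r - 1 := by omega
          subst this
          exact h2
      simp [h0, hp]

theorem contains_eq_aux (in_set : List (Int × Int)) (el : Int) :
    pbContains (pbMerged in_set) (2 * |el| - 1) = paAux in_set el := by
  obtain ⟨hg, hcov⟩ := pbMerged_spec in_set
  have h1 := pbContains_iff (pbMerged in_set) (2 * |el| - 1) hg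
  have h2 := paAux_iff in_set el
  rw [hcov] at h1
  cases hb : pbContains (pbMerged in_set) (2 * |el| - 1) <;>
    cases ha : paAux in_set el <;> simp_all

-- A's flag fold is monotone
theorem paFlags_mono (in_set : List (Int × Int)) (cycle : List Int) :
    ∀ fl : Bool × Bool,
      (fl.1 = true → (cycle.foldl (fun fl el => if paAux in_set el then (true, fl.2) else (fl.1, true)) fl).1 = true) ∧
      (fl.2 = true → (cycle.foldl (fun fl el => if paAux in_set el then (true, fl.2) else (fl.1, true)) fl).2 = true) := by
  induction cycle with
  | nil => intro fl; exact ⟨fun h => h, fun h => h⟩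
  | cons el t ih =>
    intro fl
    rw [List.foldl_cons]
    by_cases h : paAux in_set el = true
    · rw [if_pos h]
      exact ⟨fun _ => (ih (true, fl.2)).1 rfl, fun h2 => (ih (true, fl.2)).2 h2⟩
    · rw [if_neg h]
      exact ⟨fun h1 => (ih (fl.1, true)).1 h1, fun _ => (ih (fl.1, true)).2 rfl⟩

-- B's early-exit scan computes A's two flags anded
theorem pbCycle_eq (in_set : List (Int × Int)) (cycle : List Int) :
    ∀ fl : Bool × Bool, (fl.1 && fl.2) = false →
      pbCycle (pbMerged in_set) cycle fl.1 fl.2 =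
      ((cycle.foldl (fun fl el => if paAux in_set el then (true, fl.2) else (fl.1, true)) fl).1 &&
       (cycle.foldl (fun fl el => if paAux in_set el then (true, fl.2) else (fl.1, true)) fl).2) := by
  induction cycle with
  | nil =>
    intro fl hfl
    simp [pbCycle, hfl]
  | cons el t ih =>
    intro fl hfl
    rw [List.foldl_cons]
    show (let c := pbContains (pbMerged in_set) (2 * |el| - 1);
          let in_c' := if c then true else fl.1;
          let out_c' := if c then fl.2 else true;
          if in_c' && out_c' then true else pbCycle (pbMerged in_set) t in_c' out_c') = _
    rw [contains_eq_aux in_set el]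
    by_cases h : paAux in_set el = true
    · simp only [h, if_pos]
      by_cases h2 : fl.2 = true
      · have hstep : ((true : Bool) && fl.2) = true := by simp [h2]
        rw [if_pos hstep]
        have m1 := (paFlags_mono in_set t (true, fl.2)).1 rfl
        have m2 := (paFlags_mono in_set t (true, fl.2)).2 h2
        rw [m1, m2]
        rfl
      · have h2' : fl.2 = false := by simpa using h2
        have hstep : ((true : Bool) && fl.2) = false := by simp [h2']
        rw [if_neg (by simp [hstep])]
        exact ih (true, fl.2) hstep
    · have h' : paAux in_set el = false := by simpa using h
      simp only [h', Bool.false_eq_true, if_false]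
      by_cases h1 : fl.1 = true
      · have hstep : (fl.1 && true) = true := by simp [h1]
        rw [if_pos hstep]
        have m1 := (paFlags_mono in_set t (fl.1, true)).1 h1
        have m2 := (paFlags_mono in_set t (fl.1, true)).2 rfl
        rw [m1, m2]
        rfl
      · have h1' : fl.1 = false := by simpa using h1
        have hstep : (fl.1 && true) = false := by simp [h1']
        rw [if_neg (by simp [hstep])]
        exact ih (fl.1, true) hstep

-- the two outer loops agree, position by position
theorem loop_eq (in_set : List (Int × Int)) (extensions : List (List Int)) :
    ∀ k : Nat, k ≤ extensions.length →
    paLoop in_set extensions (extensions.length - k) (k : Int) =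
      match pbLoop (pbMerged in_set) (extensions.drop k) (k : Int) with
      | some (cycle, count) => (some cycle, count)
      | none => (none, (extensions.length : Int)) := by
  intro k hk
  induction hn : extensions.length - k generalizing k with
  | zero =>
    have hk' : k = extensions.length := by omega
    rw [paLoop]
    rw [hk', List.drop_length]
    simp [pbLoop]
  | succ n ihn =>
    have hklt : k < extensions.length := by omega
    rw [paLoop, if_pos (by exact_mod_cast hklt)]
    have hget : PySem.List.pyGet? extensions (k : Int) = some extensions[k] := by
      rw [PySem.List.pyGet?_natCast]
      exact List.getElem?_eq_getElem hklt
    rw [hget]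
    have hdrop : extensions.drop k = extensions[k] :: extensions.drop (k + 1) :=
      List.drop_eq_getElem_cons hklt
    rw [hdrop]
    have hcyc := pbCycle_eq in_set extensions[k] (false, false) (by simp)
    show (let fl := paFlags in_set extensions[k];
          if fl.1 && fl.2 then (some extensions[k], (k : Int))
          else paLoop in_set extensions n ((k : Int) + 1)) = _
    simp only [pbLoop]
    rw [hcyc]
    unfold paFlags
    by_cases hfound : ((extensions[k].foldl (fun fl el => if paAux in_set el then (true, fl.2) else (fl.1, true)) (false, false)).1 &&
        (extensions[k].foldl (fun fl el => if paAux in_set el then (true, fl.2) else (fl.1, true)) (false, false)).2) = true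
    · rw [if_pos hfound, if_pos hfound]
    · rw [if_neg hfound, if_neg hfound]
      have hcast : (k : Int) + 1 = ((k + 1 : Nat) : Int) := by push_cast; ring
      rw [hcast]
      exact ihn (k + 1) (by omega) (by omega)

-- ===== VERDICT (by name: the statement is the Claim_ definition above) =====
theorem partial_extension_spec : Claim_equal_partial_extension := by
  intro in_set extensions _
  unfold Spec_partial_extension partial_extension partial_extension_alt
  have h := loop_eq in_set extensions 0 (Nat.zero_le _)
  simpa using h
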